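-- pv_equiv track=rewrite | github.com/bodacom/beetroot | problems/russian_warship.py | make_frame
-- ===== SOURCE A (Python) =====
-- def make_sea_subframe(sea: list, header: str, start_indentation: str, middle_indentation: str):
--
--     sea_subframe = []
--     sea_subframe.append(header)
--     for index, row in enumerate(sea):
--         if index < 9:
--             line_number = ' ' + str(index+1)
--         else:
--             line_number = str(index+1)
--         line = line_number + '  '
--         for element in row:
--             line = line + element + '  '
--         sea_subframe.append(line)
--     return sea_subframe
--
-- def make_frame(my_war_sea: list, hostile_war_sea: list):
--
--     total_frame = []
--     my_sea_subframe = []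
--     hostile_sea_subframe = []
--     header = '    A  B  C  D  E  F  G  H  I  J  '
--     start_indentation = '   '
--     middle_indentation = '     '
--
--     my_sea_subframe = make_sea_subframe(my_war_sea, header, start_indentation, middle_indentation)
--     hostile_sea_subframe = make_sea_subframe(hostile_war_sea, header, start_indentation, middle_indentation)
--
--     # trying to make frame
--     for index in range(len(my_sea_subframe)):
--         line = start_indentation + my_sea_subframe[index] + middle_indentation + hostile_sea_subframe[index]
--         total_frame.append(line)
--
--     return total_frame
-- ===== SOURCE B (Python) =====
-- def make_frame(my_war_sea: list, hostile_war_sea: list):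
--     header = '    A  B  C  D  E  F  G  H  I  J  '
--
--     def row(index, cells):
--         number = str(index + 1)
--         if index < 9:
--             number = ' ' + number
--         return number + '  ' + ''.join(cell + '  ' for cell in cells)
--
--     frame = ['   ' + header + '     ' + header]
--     for index, (mine, theirs) in enumerate(zip(my_war_sea, hostile_war_sea)):
--         frame.append('   ' + row(index, mine) + '     ' + row(index, theirs))
--     return frame
-- ===== Notes on version B (the rewrite author's own statement) =====
-- stated objective: simpler
-- what changed: Drops the make_sea_subframe helper and the second index-based stitching pass: B emits the combined header line and then builds each combined line directly in one pass over zip(my_war_sea, hostile_war_sea), building the row text with ''.join instead of repeated string concatenation and keeping no intermediate per-grid lists.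
import Mathlib
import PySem

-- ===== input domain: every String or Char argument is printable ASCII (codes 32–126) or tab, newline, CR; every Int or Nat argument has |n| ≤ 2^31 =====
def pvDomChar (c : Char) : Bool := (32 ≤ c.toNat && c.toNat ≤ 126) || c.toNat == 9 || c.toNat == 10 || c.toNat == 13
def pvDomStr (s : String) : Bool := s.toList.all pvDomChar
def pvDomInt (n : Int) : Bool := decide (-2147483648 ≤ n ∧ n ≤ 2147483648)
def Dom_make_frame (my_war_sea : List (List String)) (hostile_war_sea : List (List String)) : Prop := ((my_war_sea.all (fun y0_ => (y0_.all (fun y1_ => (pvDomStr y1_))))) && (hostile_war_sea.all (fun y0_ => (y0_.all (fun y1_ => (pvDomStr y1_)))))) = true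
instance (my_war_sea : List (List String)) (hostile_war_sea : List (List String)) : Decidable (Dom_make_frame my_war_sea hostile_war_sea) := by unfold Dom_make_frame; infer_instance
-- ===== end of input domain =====

-- B drops A's per-grid subframe helper and A's second index-based stitching pass:
-- one pass over the zipped grids, each row text built by a join (objective: simpler).

-- ===== PORT A =====
def make_sea_subframe (sea : List (List String)) (header : String)
    (start_indentation : String) (middle_indentation : String) : List String :=
  (PySem.List.enumerate sea 0).foldl (fun sea_subframe p =>
    let line_number := if p.1 < 9 then " " ++ PySem.Int.toStr (p.1 + 1) else PySem.Int.toStr (p.1 + 1)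
    let line := p.2.foldl (fun line element => line ++ element ++ "  ") (line_number ++ "  ")
    sea_subframe ++ [line]) [header]

def make_frame (my_war_sea : List (List String)) (hostile_war_sea : List (List String)) : List String :=
  let header := "    A  B  C  D  E  F  G  H  I  J  "
  let start_indentation := "   "
  let middle_indentation := "     "
  let my_sea_subframe := make_sea_subframe my_war_sea header start_indentation middle_indentation
  let hostile_sea_subframe := make_sea_subframe hostile_war_sea header start_indentation middle_indentation
  -- my_sea_subframe[index] / hostile_sea_subframe[index]: pyGetD with default "" is exact
  -- whenever the index is in range, which Pre_ guarantees (Python raises IndexError otherwise).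
  (PySem.List.pyRange 0 (my_sea_subframe.length : Int) 1).foldl (fun total_frame index =>
    total_frame ++ [start_indentation ++ PySem.List.pyGetD my_sea_subframe index ""
                     ++ middle_indentation ++ PySem.List.pyGetD hostile_sea_subframe index ""]) []

-- ===== PORT B =====
def pvRow (index : Int) (cells : List String) : String :=
  let number := PySem.Int.toStr (index + 1)
  let number := if index < 9 then " " ++ number else number
  -- ''.join(cell + '  ' for cell in cells)
  number ++ "  " ++ (cells.map (fun cell => cell ++ "  ")).foldl (· ++ ·) ""

def make_frame_alt (my_war_sea : List (List String)) (hostile_war_sea : List (List String)) : List String :=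
  let header := "    A  B  C  D  E  F  G  H  I  J  "
  (PySem.List.enumerate (my_war_sea.zip hostile_war_sea) 0).foldl
    (fun frame p => frame ++ ["   " ++ pvRow p.1 p.2.1 ++ "     " ++ pvRow p.1 p.2.2])
    ["   " ++ header ++ "     " ++ header]

-- ===== PRECONDITION & SPEC =====
-- Pre_ excludes exactly the inputs on which A raises IndexError: a hostile grid with
-- fewer rows than my grid (A's stitching loop indexes past the hostile subframe;
-- B's natural zip truncates and returns the frame for the common rows there).
def Pre_make_frame (my_war_sea : List (List String)) (hostile_war_sea : List (List String)) : Prop :=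
  my_war_sea.length ≤ hostile_war_sea.length
instance (my_war_sea : List (List String)) (hostile_war_sea : List (List String)) : Decidable (Pre_make_frame my_war_sea hostile_war_sea) := by unfold Pre_make_frame; infer_instance

def pvWitness_make_frame : List (List String) × List (List String) := ([["X", "~"]], [["o", "~"]])

def Spec_make_frame (my_war_sea : List (List String)) (hostile_war_sea : List (List String)) (out : List String) : Prop := out = make_frame_alt my_war_sea hostile_war_sea
instance (my_war_sea : List (List String)) (hostile_war_sea : List (List String)) (out : List String) : Decidable (Spec_make_frame my_war_sea hostile_war_sea out) := by unfold Spec_make_frame; infer_instance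

-- ===== CLAIM (what is proved, stated in full; the proofs are below) =====
def Claim_equal_make_frame : Prop := ∀ (my_war_sea : List (List String)) (hostile_war_sea : List (List String)), Dom_make_frame my_war_sea hostile_war_sea → Pre_make_frame my_war_sea hostile_war_sea → Spec_make_frame my_war_sea hostile_war_sea (make_frame my_war_sea hostile_war_sea)

-- ===== LEMMAS AND PROOFS =====

-- folding ++ over strings: the start segment factors out
lemma pv_foldl_str (l : List String) (a b : String) :
    l.foldl (· ++ ·) (a ++ b) = a ++ l.foldl (· ++ ·) b := by
  induction l generalizing b with
  | nil => simp
  | cons x xs ih => simpa [String.append_assoc] using ih (b ++ x)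

lemma pv_foldl_str' (l : List String) (a : String) :
    l.foldl (· ++ ·) a = a ++ l.foldl (· ++ ·) "" := by
  have h := pv_foldl_str l a ""
  rwa [String.append_empty] at h

-- A's accumulated row string is the join that B computes
lemma pv_foldl_row (cells : List String) (init : String) :
    cells.foldl (fun line element => line ++ element ++ "  ") init
      = init ++ (cells.map (fun cell => cell ++ "  ")).foldl (· ++ ·) "" := by
  induction cells generalizing init with
  | nil => simp
  | cons c cs ih =>
    simp only [List.foldl_cons, List.map_cons]
    rw [ih, String.empty_append, pv_foldl_str' _ (c ++ "  ")]
    simp [String.append_assoc]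

-- zipping two enumerations is enumerating the zip
lemma pv_zip_enumerate {a b : Type} (xs : List a) (ys : List b) (s : Int) :
    (PySem.List.enumerate xs s).zip (PySem.List.enumerate ys s)
      = (PySem.List.enumerate (xs.zip ys) s).map (fun p => ((p.1, p.2.1), (p.1, p.2.2))) := by
  induction xs generalizing ys s with
  | nil => simp [PySem.List.enumerate_nil]
  | cons x xs ih =>
    cases ys with
    | nil => simp [PySem.List.enumerate_nil, PySem.List.enumerate_cons]
    | cons y ys => simp [PySem.List.enumerate_cons, ih]

lemma pv_range_map_zip {γ : Type} (xs ys : List String) (f : String → String → γ)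
    (h : xs.length ≤ ys.length) :
    (List.range xs.length).map (fun k => f (xs.getD k "") (ys.getD k ""))
      = (xs.zip ys).map (fun p => f p.1 p.2) := by
  induction xs generalizing ys with
  | nil => simp
  | cons x xs ih =>
    cases ys with
    | nil => simp at h
    | cons y ys =>
      rw [List.length_cons, List.range_succ_eq_map]
      simp only [List.map_cons, List.map_map, List.zip_cons_cons, List.getD_cons_zero]
      refine List.cons_eq_cons.mpr ⟨rfl, ?_⟩
      rw [← ih ys (by simpa using h)]
      apply List.map_congr_left
      intro k hk
      simp [Function.comp, Nat.succ_eq_add_one]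

-- A's index-driven stitching pass over two lists (second at least as long) is a map over their zip
lemma pv_index_map_zip {γ : Type} (xs ys : List String) (f : String → String → γ)
    (h : xs.length ≤ ys.length) :
    (PySem.List.pyRange 0 (xs.length : Int) 1).map
        (fun j => f (PySem.List.pyGetD xs j "") (PySem.List.pyGetD ys j ""))
      = (xs.zip ys).map (fun p => f p.1 p.2) := by
  rw [PySem.List.pyRange_one]
  simp only [sub_zero, Int.toNat_natCast, List.map_map]
  rw [← pv_range_map_zip xs ys f h]
  apply List.map_congr_left
  intro k hk
  simp [PySem.List.pyGetD_natCast]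

-- ===== VERDICT (by name: the statement is the Claim_ definition above) =====
theorem make_frame_spec : Claim_equal_make_frame := by
  intro my hostile _ hpre
  show make_frame my hostile = make_frame_alt my hostile
  unfold make_frame make_frame_alt make_sea_subframe pvRow
  simp only [PySem.List.foldl_append_singleton_eq_map, List.nil_append]
  rw [pv_index_map_zip _ _ (fun a b => "   " ++ a ++ "     " ++ b) (by simpa using hpre)]
  simp only [List.singleton_append, List.zip_cons_cons, List.map_cons, List.zip_map,
    pv_zip_enumerate, List.map_map]
  refine List.cons_eq_cons.mpr ⟨rfl, ?_⟩
  apply List.map_congr_left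
  intro p hp
  simp only [Function.comp_apply, Prod.map_apply]
  rw [pv_foldl_row, pv_foldl_row]
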